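-- pv_equiv track=rewrite | github.com/aasthakatiyar/FastaGO-ExplainableAI | app.py | _select_deepest_by_namespace
-- ===== SOURCE A (Python) =====
-- def _get_depth(go_id, parent_lookup, cache):
--     if go_id in cache:
--         return cache[go_id]
--
--     parents = parent_lookup.get(go_id, set())
--     if not parents:
--         cache[go_id] = 0
--         return 0
--
--     parent_depths = [_get_depth(parent, parent_lookup, cache) for parent in parents if parent != go_id]
--     depth = 1 + (max(parent_depths) if parent_depths else 0)
--     cache[go_id] = depth
--     return depth
--
-- def _select_deepest_by_namespace(indices, go_terms, go_meta, parent_lookup, k_per_namespace=1):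
--     if not indices:
--         return []
--
--     depth_cache = {}
--     namespace_to_indices = {}
--     for idx in indices:
--         go_id = go_terms[idx]
--         namespace = go_meta.get(go_id, {}).get("namespace", "")
--         namespace_to_indices.setdefault(namespace, []).append(idx)
--
--     selected = []
--     for ns_indices in namespace_to_indices.values():
--         max_depth = max(_get_depth(go_terms[idx], parent_lookup, depth_cache) for idx in ns_indices)
--         deepest = [idx for idx in ns_indices if _get_depth(go_terms[idx], parent_lookup, depth_cache) == max_depth]
--         selected.extend(deepest[:k_per_namespace])
--
--     selected_set = set(selected)
--     return [idx for idx in indices if idx in selected_set]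
-- ===== SOURCE B (Python) =====
-- def _get_depth(go_id, parent_lookup, cache):
--     if go_id in cache:
--         return cache[go_id]
--
--     parents = parent_lookup.get(go_id, set())
--     if not parents:
--         cache[go_id] = 0
--         return 0
--
--     parent_depths = [_get_depth(parent, parent_lookup, cache) for parent in parents if parent != go_id]
--     depth = 1 + (max(parent_depths) if parent_depths else 0)
--     cache[go_id] = depth
--     return depth
--
-- def _select_deepest_by_namespace(indices, go_terms, go_meta, parent_lookup, k_per_namespace=1):
--     cache = {}
--     best = {}  # namespace -> (max_depth_so_far, indices at that depth, in order)
--     for idx in indices: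
--         go_id = go_terms[idx]
--         ns = go_meta.get(go_id, {}).get("namespace", "")
--         d = _get_depth(go_id, parent_lookup, cache)
--         entry = best.get(ns)
--         if entry is None or d > entry[0]:
--             best[ns] = (d, [idx])
--         elif d == entry[0]:
--             entry[1].append(idx)
--     selected = set()
--     for _depth, lst in best.values():
--         selected.update(lst[:k_per_namespace])
--     return [idx for idx in indices if idx in selected]
-- ===== Notes on version B (the rewrite author's own statement) =====
-- stated objective: alternative
-- what changed: Replaces A's three-phase per-namespace structure (group indices by namespace, then per group a max-depth pass plus a filter pass and a slice) by a single streaming pass that maintains, per namespace, the running maximum depth and the list of indices attaining it, replacing the list on a strictly deeper index and appending on a tie; the selected set is then the first k of each namespace's list.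
import Mathlib
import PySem

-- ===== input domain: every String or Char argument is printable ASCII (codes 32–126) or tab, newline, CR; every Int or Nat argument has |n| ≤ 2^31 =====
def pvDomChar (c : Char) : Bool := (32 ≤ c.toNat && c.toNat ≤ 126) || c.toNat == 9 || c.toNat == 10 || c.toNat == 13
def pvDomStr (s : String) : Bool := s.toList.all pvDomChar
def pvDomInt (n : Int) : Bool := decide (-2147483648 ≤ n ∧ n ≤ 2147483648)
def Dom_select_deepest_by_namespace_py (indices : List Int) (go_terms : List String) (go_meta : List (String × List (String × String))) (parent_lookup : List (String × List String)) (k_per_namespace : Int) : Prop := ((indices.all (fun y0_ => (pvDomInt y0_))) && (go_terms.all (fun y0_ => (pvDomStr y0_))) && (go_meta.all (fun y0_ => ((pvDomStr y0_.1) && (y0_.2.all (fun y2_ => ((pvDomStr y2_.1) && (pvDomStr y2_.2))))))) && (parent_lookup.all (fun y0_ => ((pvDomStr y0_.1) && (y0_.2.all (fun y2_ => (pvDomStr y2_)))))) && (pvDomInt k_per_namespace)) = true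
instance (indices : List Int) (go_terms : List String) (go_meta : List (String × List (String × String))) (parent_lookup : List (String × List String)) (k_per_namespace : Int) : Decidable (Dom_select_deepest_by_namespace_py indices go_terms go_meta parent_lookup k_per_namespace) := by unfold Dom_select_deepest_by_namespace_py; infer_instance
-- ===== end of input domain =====

-- B replaces A's group-then-max-then-filter-then-slice per-namespace phases by one streaming
-- best-tracking pass per namespace (alternative decomposition, same cost); equivalence of the
-- RETURN value is proved on Pre_ (A mutates nothing the caller observes).

-- ===== PORT A =====
-- shared helper of both Pythons: the memoized _get_depth, fuel-totalized (fuel never runs out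
-- under Pre_); 'max(parent_depths) if parent_depths else 0' is pvMaxD
def pvMaxD (l : List Int) : Int :=
  match PySem.List.max? l (fun x => x) with
  | some m => m
  | none => 0

def pvGetDepth (pl : List (String × List String)) : Nat → String → PySem.Dict String Int → Int × PySem.Dict String Int
  | 0, _, c => (0, c)  -- fuel exhaustion, unreachable under Pre_
  | f+1, g, c =>
    match PySem.Dict.get? c g with
    | some d => (d, c)
    | none =>
      let parents := (PySem.Dict.get? (PySem.Dict.mk pl) g).getD []
      if parents = [] then (0, PySem.Dict.insert c g 0)
      else
        let r := (parents.filter (fun p => p != g)).foldl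
          (fun (acc : List Int × PySem.Dict String Int) p =>
            let s := pvGetDepth pl f p acc.2
            (acc.1 ++ [s.1], s.2)) ([], c)
        let depth := 1 + pvMaxD r.1
        (depth, PySem.Dict.insert r.2 g depth)

def pvFuel (pl : List (String × List String)) : Nat := pl.length + 2

def pvTerm (go_terms : List String) (idx : Int) : String := PySem.List.pyGetD go_terms idx ""

def pvNsOf (go_terms : List String) (go_meta : List (String × List (String × String))) (idx : Int) : String :=
  PySem.Dict.getD (PySem.Dict.mk ((PySem.Dict.get? (PySem.Dict.mk go_meta) (pvTerm go_terms idx)).getD [])) "namespace" ""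

def pvDepthsFold (pl : List (String × List String)) (F : Nat) (gt : List String)
    (gl : List Int) (c : PySem.Dict String Int) : List Int × PySem.Dict String Int :=
  gl.foldl (fun (a : List Int × PySem.Dict String Int) idx =>
    let s := pvGetDepth pl F (pvTerm gt idx) a.2
    (a.1 ++ [s.1], s.2)) ([], c)

def pvDeepFold (pl : List (String × List String)) (F : Nat) (gt : List String) (m : Int)
    (gl : List Int) (c : PySem.Dict String Int) : List Int × PySem.Dict String Int :=
  gl.foldl (fun (a : List Int × PySem.Dict String Int) idx =>
    let s := pvGetDepth pl F (pvTerm gt idx) a.2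
    (if s.1 = m then a.1 ++ [idx] else a.1, s.2)) ([], c)

-- one iteration of A's loop over the namespace groups: depth pass, max, filter pass, slice
def pvAStep (pl : List (String × List String)) (F : Nat) (gt : List String) (k : Int)
    (acc : List Int × PySem.Dict String Int) (gl : List Int) : List Int × PySem.Dict String Int :=
  let r1 := pvDepthsFold pl F gt gl acc.2
  let m := pvMaxD r1.1   -- max over a NONEMPTY group, so max? = some here
  let r2 := pvDeepFold pl F gt m gl r1.2
  (acc.1 ++ PySem.List.slice r2.1 none (some k), r2.2)

-- one iteration of A's grouping loop (setdefault(ns, []).append(idx))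
def pvGStep (gt : List String) (gm : List (String × List (String × String)))
    (d : PySem.Dict String (List Int)) (idx : Int) : PySem.Dict String (List Int) :=
  let ns := pvNsOf gt gm idx
  PySem.Dict.insert d ns (PySem.Dict.getD d ns [] ++ [idx])

def select_deepest_by_namespace_py (indices : List Int) (go_terms : List String) (go_meta : List (String × List (String × String))) (parent_lookup : List (String × List String)) (k_per_namespace : Int) : List Int :=
  if indices = [] then []
  else
    let F := pvFuel parent_lookup
    let nsdict := indices.foldl (pvGStep go_terms go_meta) (PySem.Dict.mk [])
    let r := (PySem.Dict.values nsdict).foldl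
      (pvAStep parent_lookup F go_terms k_per_namespace) ([], PySem.Dict.mk [])
    let selset := PySem.Set.ofList r.1
    indices.filter (fun idx => PySem.Set.contains selset idx)

-- ===== PORT B =====
def pvBestUpd (best : PySem.Dict String (Int × List Int)) (ns : String) (idx : Int) (d : Int) : PySem.Dict String (Int × List Int) :=
  match PySem.Dict.get? best ns with
  | none => PySem.Dict.insert best ns (d, [idx])
  | some e =>
    if e.1 < d then PySem.Dict.insert best ns (d, [idx])
    else if d = e.1 then PySem.Dict.insert best ns (e.1, e.2 ++ [idx])
    else best

-- one iteration of B's single streaming pass: depth, then best-tracking update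
def pvBStep (pl : List (String × List String)) (F : Nat) (gt : List String)
    (gm : List (String × List (String × String)))
    (st : PySem.Dict String (Int × List Int) × PySem.Dict String Int) (idx : Int) :
    PySem.Dict String (Int × List Int) × PySem.Dict String Int :=
  let s := pvGetDepth pl F (pvTerm gt idx) st.2
  (pvBestUpd st.1 (pvNsOf gt gm idx) idx s.1, s.2)

def select_deepest_by_namespace_py_alt (indices : List Int) (go_terms : List String) (go_meta : List (String × List (String × String))) (parent_lookup : List (String × List String)) (k_per_namespace : Int) : List Int :=
  let F := pvFuel parent_lookup
  let st := indices.foldl (pvBStep parent_lookup F go_terms go_meta)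
    (PySem.Dict.mk [], PySem.Dict.mk [])
  let selected := (PySem.Dict.values st.1).foldl
    (fun (s : PySem.Set Int) e => PySem.Set.update s (PySem.List.slice e.2 none (some k_per_namespace)))
    PySem.Set.empty
  indices.filter (fun idx => PySem.Set.contains selected idx)

-- ===== PRECONDITION & SPEC =====
-- one step of the 'parent-of' relation A's recursion follows (self-parents are skipped by A)
def pvStep (pl : List (String × List String)) (S : List String) : List String :=
  PySem.Set.ofList (S.flatMap (fun g => ((PySem.Dict.get? (PySem.Dict.mk pl) g).getD []).filter (fun p => p != g)))

def pvStepIter (pl : List (String × List String)) : Nat → List String → List String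
  | 0, S => S
  | f+1, S => pvStepIter pl f (pvStep pl S)

-- Pre_ excludes exactly the inputs on which A raises: an out-of-range index into go_terms
-- (IndexError), or an unboundedly long non-self parent chain — i.e. a reachable parent cycle —
-- from a used GO term (infinite recursion / RecursionError).
def Pre_select_deepest_by_namespace_py (indices : List Int) (go_terms : List String) (go_meta : List (String × List (String × String))) (parent_lookup : List (String × List String)) (k_per_namespace : Int) : Prop :=
  (∀ i ∈ indices, PySem.Raise.InRange go_terms.length i) ∧
  pvStepIter parent_lookup (pvFuel parent_lookup) (PySem.Set.ofList (indices.map (pvTerm go_terms))) = []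
instance (indices : List Int) (go_terms : List String) (go_meta : List (String × List (String × String))) (parent_lookup : List (String × List String)) (k_per_namespace : Int) : Decidable (Pre_select_deepest_by_namespace_py indices go_terms go_meta parent_lookup k_per_namespace) := by unfold Pre_select_deepest_by_namespace_py; infer_instance

def pvWitness_select_deepest_by_namespace_py : List Int × List String × (List (String × List (String × String))) × (List (String × List String)) × Int :=
  ([0, 1, -1], ["GO:1", "GO:2"], [("GO:1", [("namespace", "bp")]), ("GO:2", [("namespace", "bp")])], [("GO:2", ["GO:1"])], 1)

def Spec_select_deepest_by_namespace_py (indices : List Int) (go_terms : List String) (go_meta : List (String × List (String × String))) (parent_lookup : List (String × List String)) (k_per_namespace : Int) (out : List Int) : Prop := out = select_deepest_by_namespace_py_alt indices go_terms go_meta parent_lookup k_per_namespace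
instance (indices : List Int) (go_terms : List String) (go_meta : List (String × List (String × String))) (parent_lookup : List (String × List String)) (k_per_namespace : Int) (out : List Int) : Decidable (Spec_select_deepest_by_namespace_py indices go_terms go_meta parent_lookup k_per_namespace out) := by unfold Spec_select_deepest_by_namespace_py; infer_instance

-- ===== CLAIM (what is proved, stated in full; the proofs are below) =====
def Claim_equal_select_deepest_by_namespace_py : Prop := ∀ (indices : List Int) (go_terms : List String) (go_meta : List (String × List (String × String))) (parent_lookup : List (String × List String)) (k_per_namespace : Int), Dom_select_deepest_by_namespace_py indices go_terms go_meta parent_lookup k_per_namespace → Pre_select_deepest_by_namespace_py indices go_terms go_meta parent_lookup k_per_namespace → Spec_select_deepest_by_namespace_py indices go_terms go_meta parent_lookup k_per_namespace (select_deepest_by_namespace_py indices go_terms go_meta parent_lookup k_per_namespace)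

-- ===== LEMMAS AND PROOFS =====

-- pure (cache-free) depth of a GO term, by fuel
def pvDepth (pl : List (String × List String)) : Nat → String → Int
  | 0, _ => 0
  | f+1, g =>
    let parents := (PySem.Dict.get? (PySem.Dict.mk pl) g).getD []
    if parents = [] then 0
    else 1 + pvMaxD ((parents.filter (fun p => p != g)).map (pvDepth pl f))

-- a cache is sound: every entry is the pure depth of its key, at a fuel that terminates for it
def pvSound (pl : List (String × List String)) (c : PySem.Dict String Int) : Prop :=
  ∀ g d, PySem.Dict.get? c g = some d → ∃ k, pvStepIter pl k [g] = [] ∧ d = pvDepth pl k g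

theorem pvStep_mem (pl : List (String × List String)) (S : List String) (x : String) :
    x ∈ pvStep pl S ↔ ∃ g ∈ S, x ∈ ((PySem.Dict.get? (PySem.Dict.mk pl) g).getD []).filter (fun p => p != g) := by
  simp [pvStep, PySem.Set.mem_ofList, List.mem_flatMap]

theorem pvStepIter_mono (pl : List (String × List String)) (k : Nat) : ∀ (S T : List String),
    (∀ x ∈ S, x ∈ T) → ∀ (y : String), y ∈ pvStepIter pl k S → y ∈ pvStepIter pl k T := by
  induction k with
  | zero => intro S T h y hy; exact h y hy
  | succ k ih =>
    intro S T h y hy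
    exact ih (pvStep pl S) (pvStep pl T)
      (fun x hx => by
        rcases (pvStep_mem pl S x).1 hx with ⟨g, hg, hgx⟩
        exact (pvStep_mem pl T x).2 ⟨g, h g hg, hgx⟩) y hy

theorem pvStepIter_empty_of_mem (pl : List (String × List String)) (k : Nat) (S : List String)
    (h : pvStepIter pl k S = []) (g : String) (hg : g ∈ S) : pvStepIter pl k [g] = [] := by
  rw [List.eq_nil_iff_forall_not_mem]
  intro x hx
  have hmem := pvStepIter_mono pl k [g] S (fun y hy => by simp at hy; exact hy ▸ hg) x hx
  rw [h] at hmem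
  exact List.not_mem_nil hmem

theorem pvStep_parent (pl : List (String × List String)) (k : Nat) (g p : String)
    (hp : p ∈ ((PySem.Dict.get? (PySem.Dict.mk pl) g).getD []).filter (fun q => q != g))
    (h : pvStepIter pl (k+1) [g] = []) : pvStepIter pl k [p] = [] := by
  have hps : p ∈ pvStep pl [g] := (pvStep_mem pl [g] p).2 ⟨g, by simp, hp⟩
  exact pvStepIter_empty_of_mem pl k (pvStep pl [g]) h p hps

theorem pvDepth_stab (pl : List (String × List String)) :
    ∀ (f : Nat) (g : String), pvStepIter pl f [g] = [] → ∀ f2, f ≤ f2 → pvDepth pl f g = pvDepth pl f2 g := by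
  intro f
  induction f with
  | zero => intro g h; simp [pvStepIter] at h
  | succ f ih =>
    intro g h f2 hf2
    cases f2 with
    | zero => omega
    | succ f3 =>
      simp only [pvDepth]
      split_ifs with hpar
      · rfl
      · congr 1
        congr 1
        apply List.map_congr_left
        intro p hp
        exact ih p (pvStep_parent pl f g p hp h) f3 (by omega)

theorem pvDepth_stab2 (pl : List (String × List String)) (k f : Nat) (g : String)
    (hk : pvStepIter pl k [g] = []) (hf : pvStepIter pl f [g] = []) :
    pvDepth pl k g = pvDepth pl f g := by
  rw [pvDepth_stab pl k g hk (max k f) (Nat.le_max_left k f),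
      pvDepth_stab pl f g hf (max k f) (Nat.le_max_right k f)]

-- memoization is correct: with a sound cache and enough fuel, _get_depth returns the pure depth
-- and keeps the cache sound
theorem pvGetDepth_correct (pl : List (String × List String)) :
    ∀ (f : Nat) (g : String) (c : PySem.Dict String Int),
    pvStepIter pl f [g] = [] → pvSound pl c →
    (pvGetDepth pl f g c).1 = pvDepth pl f g ∧ pvSound pl (pvGetDepth pl f g c).2 := by
  intro f
  induction f with
  | zero => intro g c h _; simp [pvStepIter] at h
  | succ f ih =>
    intro g c h hs
    simp only [pvGetDepth]
    cases hc : PySem.Dict.get? c g with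
    | some d =>
      simp only [hc]
      rcases hs g d hc with ⟨k, hk, hd⟩
      exact ⟨by simpa [hd] using pvDepth_stab2 pl k (f+1) g hk h, hs⟩
    | none =>
      simp only [hc]
      split_ifs with hpar
      · refine ⟨by simp [pvDepth, hpar], ?_⟩
        intro g2 d2 hg2
        by_cases hgg : g2 = g
        · subst hgg
          rw [PySem.Dict.get?_insert_self] at hg2
          exact ⟨f+1, h, by simp only [Option.some.injEq] at hg2; simp [← hg2, pvDepth, hpar]⟩
        · rw [PySem.Dict.get?_insert_of_ne _ _ hgg] at hg2
          exact hs g2 d2 hg2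
      · have hkey : ∀ (qs : List String), (∀ p ∈ qs, pvStepIter pl f [p] = []) →
            ∀ (acc : List Int) (c0 : PySem.Dict String Int), pvSound pl c0 →
            (qs.foldl (fun (a : List Int × PySem.Dict String Int) p =>
                (a.1 ++ [(pvGetDepth pl f p a.2).1], (pvGetDepth pl f p a.2).2)) (acc, c0)).1
              = acc ++ qs.map (pvDepth pl f)
            ∧ pvSound pl (qs.foldl (fun (a : List Int × PySem.Dict String Int) p =>
                (a.1 ++ [(pvGetDepth pl f p a.2).1], (pvGetDepth pl f p a.2).2)) (acc, c0)).2 := by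
          intro qs
          induction qs with
          | nil => intro _ acc c0 hc0; exact ⟨by simp, hc0⟩
          | cons p qs ihq =>
            intro hq acc c0 hc0
            simp only [List.foldl_cons]
            have hm := ih p c0 (hq p (by simp)) hc0
            obtain ⟨h1, h2⟩ := ihq (fun r hr => hq r (by simp [hr]))
              (acc ++ [(pvGetDepth pl f p c0).1]) ((pvGetDepth pl f p c0).2) hm.2
            exact ⟨by rw [h1, hm.1]; simp, h2⟩
        have hp_all : ∀ p ∈ ((PySem.Dict.get? (PySem.Dict.mk pl) g).getD []).filter (fun p => p != g),
            pvStepIter pl f [p] = [] := fun p hp => pvStep_parent pl f g p hp h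
        obtain ⟨h1, h2⟩ := hkey _ hp_all [] c hs
        refine ⟨?_, ?_⟩
        · show 1 + pvMaxD _ = _
          rw [h1]
          simp [pvDepth, hpar]
        · intro g2 d2 hg2
          by_cases hgg : g2 = g
          · subst hgg
            rw [PySem.Dict.get?_insert_self] at hg2
            refine ⟨f+1, h, ?_⟩
            simp only [Option.some.injEq] at hg2
            rw [← hg2, h1]
            simp [pvDepth, hpar]
          · rw [PySem.Dict.get?_insert_of_ne _ _ hgg] at hg2
            exact h2 g2 d2 hg2

-- generic reduction: any fold that threads the cache through _get_depth calls computes the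
-- pure fold of the pure depths
theorem pvFoldG {β : Type} (pl : List (String × List String)) (f : Nat) (term : Int → String)
    (upd : β → Int → Int → β) :
    ∀ (xs : List Int) (b : β) (c : PySem.Dict String Int),
    pvSound pl c → (∀ x ∈ xs, pvStepIter pl f [term x] = []) →
    (xs.foldl (fun (a : β × PySem.Dict String Int) x =>
        let s := pvGetDepth pl f (term x) a.2
        (upd a.1 x s.1, s.2)) (b, c)).1
      = xs.foldl (fun b x => upd b x (pvDepth pl f (term x))) b
    ∧ pvSound pl (xs.foldl (fun (a : β × PySem.Dict String Int) x =>
        let s := pvGetDepth pl f (term x) a.2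
        (upd a.1 x s.1, s.2)) (b, c)).2 := by
  intro xs
  induction xs with
  | nil => intro b c hc _; exact ⟨rfl, hc⟩
  | cons x xs ih =>
    intro b c hc hall
    simp only [List.foldl_cons]
    have hm := pvGetDepth_correct pl f (term x) c (hall x (by simp)) hc
    obtain ⟨h1, h2⟩ := ih (upd b x (pvGetDepth pl f (term x) c).1)
      ((pvGetDepth pl f (term x) c).2) hm.2 (fun y hy => hall y (by simp [hy]))
    rw [← hm.1]
    exact ⟨h1, h2⟩


-- ----- value-level lemmas about pvMaxD -----
theorem pvMaxD_single (a : Int) : pvMaxD [a] = a := by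
  simp [pvMaxD, PySem.List.max?]

theorem pvMaxD_append (l : List Int) (a : Int) (h : l ≠ []) :
    pvMaxD (l ++ [a]) = max (pvMaxD l) a := by
  cases l with
  | nil => simp at h
  | cons x t =>
    rw [List.cons_append]
    simp [pvMaxD, PySem.List.max?_id_cons, List.foldl_append]

theorem le_pvMaxD (l : List Int) (x : Int) (hx : x ∈ l) : x ≤ pvMaxD l := by
  cases l with
  | nil => simp at hx
  | cons y t =>
    simp only [pvMaxD, PySem.List.max?_id_cons]
    rcases List.mem_cons.1 hx with h | h
    · exact h ▸ (PySem.List.le_foldl_max t y).1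
    · exact (PySem.List.le_foldl_max t y).2 x h

-- the value B's tracker holds for a namespace whose group (in A's sense) is gl
def pvTrv (D : Int → Int) (gl : List Int) : Int × List Int :=
  (pvMaxD (gl.map D), gl.filter (fun i => decide (D i = pvMaxD (gl.map D))))

theorem pvTrv_single (D : Int → Int) (x : Int) : pvTrv D [x] = (D x, [x]) := by
  simp [pvTrv, pvMaxD_single]

-- ----- association-list (Dict) lemmas -----
theorem pvGet?_mk_map {A B : Type} (f : A → B) (l : List (String × A)) (k : String) :
    PySem.Dict.get? (PySem.Dict.mk (l.map (fun e => (e.1, f e.2)))) k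
      = (PySem.Dict.get? (PySem.Dict.mk l) k).map f := by
  induction l with
  | nil => rfl
  | cons e l ih =>
    by_cases he : (e.1 == k) = true
    · simp [PySem.Dict.get?, List.find?_cons, he]
    · simp only [PySem.Dict.get?] at ih ⊢
      simp only [List.map_cons, List.find?_cons, he]
      simpa using ih

theorem pvContains_mk_map {A B : Type} (f : A → B) (l : List (String × A)) (k : String) :
    PySem.Dict.contains (PySem.Dict.mk (l.map (fun e => (e.1, f e.2)))) k
      = PySem.Dict.contains (PySem.Dict.mk l) k := by
  simp only [PySem.Dict.contains, List.any_map]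
  rfl

theorem pvKeys_mk_map {A B : Type} (f : A → B) (l : List (String × A)) :
    (PySem.Dict.mk (l.map (fun e => (e.1, f e.2)))).keys = (PySem.Dict.mk l).keys := by
  simp [PySem.Dict.keys, List.map_map, Function.comp]

theorem pvInsert_mk_map {A B : Type} (f : A → B) (l : List (String × A)) (k : String) (v : A) :
    PySem.Dict.insert (PySem.Dict.mk (l.map (fun e => (e.1, f e.2)))) k (f v)
      = PySem.Dict.mk (((PySem.Dict.insert (PySem.Dict.mk l) k v).items).map (fun e => (e.1, f e.2))) := by
  unfold PySem.Dict.insert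
  rw [pvContains_mk_map]
  by_cases hcon : PySem.Dict.contains (PySem.Dict.mk l) k = true
  · simp only [hcon, if_pos]
    congr 1
    simp only [List.map_map]
    apply List.map_congr_left
    intro e _
    by_cases he : (e.1 == k) = true <;> simp [Function.comp, he]
  · simp only [hcon, if_neg, Bool.false_eq_true, not_false_iff]
    congr 1
    simp

theorem pvGet?_mem {A : Type} (d : PySem.Dict String A) (k : String) (v : A)
    (h : PySem.Dict.get? d k = some v) : ∃ p ∈ d.items, p.1 = k ∧ p.2 = v := by
  simp only [PySem.Dict.get?, Option.map_eq_some_iff] at h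
  rcases h with ⟨p, hp, hv⟩
  refine ⟨p, List.mem_of_find?_eq_some hp, ?_, hv⟩
  have := List.find?_some hp
  simpa using this

theorem pvItems_insert_sub {A : Type} (d : PySem.Dict String A) (k : String) (v : A)
    (e : String × A) (he : e ∈ (PySem.Dict.insert d k v).items) : e = (k, v) ∨ e ∈ d.items := by
  unfold PySem.Dict.insert at he
  by_cases hcon : PySem.Dict.contains d k = true
  · simp only [hcon, if_pos] at he
    rcases List.mem_map.1 he with ⟨p, hp, hpe⟩
    by_cases hk : (p.1 == k) = true
    · simp [hk] at hpe; left; exact hpe.symm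
    · simp [hk] at hpe; right; exact hpe ▸ hp
  · simp only [hcon, if_neg, Bool.false_eq_true, not_false_iff] at he
    rcases List.mem_append.1 he with h | h
    · right; exact h
    · left; simpa using h

theorem pvInsert_self {A : Type} (d : PySem.Dict String A) (k : String) (v : A)
    (hnd : d.keys.Nodup) (h : PySem.Dict.get? d k = some v) :
    PySem.Dict.insert d k v = d := by
  have hcon : PySem.Dict.contains d k = true := by
    simp only [PySem.Dict.get?, Option.map_eq_some_iff] at h
    rcases h with ⟨p, hp, _⟩
    simp only [PySem.Dict.contains, List.any_eq_true]
    refine ⟨p, List.mem_of_find?_eq_some hp, ?_⟩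
    have := List.find?_some hp
    simpa using this
  unfold PySem.Dict.insert
  simp only [hcon, if_pos]
  clear hcon
  obtain ⟨items⟩ := d
  simp only [PySem.Dict.keys] at hnd
  simp only [PySem.Dict.get?] at h
  congr 1
  induction items with
  | nil => simp at h
  | cons e t ih =>
    cases he : (e.1 == k) with
    | true =>
      simp only [List.find?_cons, he] at h
      have hek : e.1 = k := by simpa using he
      have hvk : v = e.2 := by simpa using h.symm
      simp only [List.map_cons, he, if_pos]
      have htail : ∀ p ∈ t, (p.1 == k) = false := by
        intro p hp
        simp only [List.map_cons, List.nodup_cons] at hnd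
        have hpe : p.1 ≠ e.1 := by
          intro hc
          exact hnd.1 (hc ▸ List.mem_map_of_mem hp)
        rw [hek] at hpe
        simpa using hpe
      rw [show ((k, v) : String × A) = e from Prod.ext hek.symm hvk]
      congr 1
      calc t.map (fun p => if (p.1 == k) = true then e else p)
          = t.map id := List.map_congr_left (fun p hp => by simp [htail p hp])
        _ = t := List.map_id t
    | false =>
      simp only [List.find?_cons, he] at h
      simp only [List.map_cons, List.nodup_cons] at hnd
      simp only [List.map_cons, he]
      rw [ih hnd.2 h]
      simp


-- ----- pure fold shapes -----
theorem pvFoldMap (D : Int → Int) : ∀ (gl acc : List Int),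
    gl.foldl (fun l i => l ++ [D i]) acc = acc ++ gl.map D := by
  intro gl
  induction gl with
  | nil => intro acc; simp
  | cons x t ih => intro acc; simp [ih]

theorem pvFoldFilter (D : Int → Int) (m : Int) : ∀ (gl acc : List Int),
    gl.foldl (fun l i => if D i = m then l ++ [i] else l) acc
      = acc ++ gl.filter (fun i => decide (D i = m)) := by
  intro gl
  induction gl with
  | nil => intro acc; simp
  | cons x t ih =>
    intro acc
    by_cases h : D x = m <;> simp [h, ih]

-- ----- invariants of A's grouping fold -----
theorem pvGrpInv (gt : List String) (gm : List (String × List (String × String))) (Q : Int → Prop) :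
    ∀ (xs : List Int) (d : PySem.Dict String (List Int)),
    d.keys.Nodup → (∀ e ∈ d.items, e.2 ≠ [] ∧ ∀ i ∈ e.2, Q i) → (∀ x ∈ xs, Q x) →
    (xs.foldl (pvGStep gt gm) d).keys.Nodup ∧
    ∀ e ∈ (xs.foldl (pvGStep gt gm) d).items, e.2 ≠ [] ∧ ∀ i ∈ e.2, Q i := by
  intro xs
  induction xs with
  | nil => intro d h1 h2 _; exact ⟨h1, h2⟩
  | cons x xs ih =>
    intro d h1 h2 hq
    simp only [List.foldl_cons]
    apply ih
    · exact PySem.Dict.nodup_keys_insert _ _ _ h1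
    · intro e he
      simp only [pvGStep] at he
      rcases pvItems_insert_sub d (pvNsOf gt gm x) (PySem.Dict.getD d (pvNsOf gt gm x) [] ++ [x]) e he with h | h
      · subst h
        refine ⟨by simp, ?_⟩
        intro i hi
        rcases List.mem_append.1 hi with hi | hi
        · cases hg : PySem.Dict.get? d (pvNsOf gt gm x) with
          | none => simp [PySem.Dict.getD, hg] at hi
          | some gl =>
            simp only [PySem.Dict.getD, hg, Option.getD_some] at hi
            rcases pvGet?_mem d _ _ hg with ⟨p, hp, _, hpv⟩
            exact (h2 p hp).2 i (hpv ▸ hi)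
        · simp at hi
          exact hi ▸ hq x (by simp)
      · exact h2 e h
    · exact fun y hy => hq y (List.mem_cons_of_mem x hy)

-- ----- the streaming tracker equals A's grouping, transformed pointwise -----
theorem pvGroupRel (gt : List String) (gm : List (String × List (String × String))) (D : Int → Int) :
    ∀ (xs : List Int) (ga : PySem.Dict String (List Int)),
    ga.keys.Nodup → (∀ e ∈ ga.items, e.2 ≠ []) →
    xs.foldl (fun bd i => pvBestUpd bd (pvNsOf gt gm i) i (D i))
        (PySem.Dict.mk (ga.items.map (fun e => (e.1, pvTrv D e.2))))
      = PySem.Dict.mk ((xs.foldl (pvGStep gt gm) ga).items.map (fun e => (e.1, pvTrv D e.2))) := by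
  intro xs
  induction xs with
  | nil => intro ga _ _; rfl
  | cons x xs ih =>
    intro ga hnd hne
    simp only [List.foldl_cons]
    have hstep : pvBestUpd (PySem.Dict.mk (ga.items.map (fun e => (e.1, pvTrv D e.2)))) (pvNsOf gt gm x) x (D x)
        = PySem.Dict.mk ((pvGStep gt gm ga x).items.map (fun e => (e.1, pvTrv D e.2))) := by
      unfold pvBestUpd pvGStep
      rw [pvGet?_mk_map (fun gl => pvTrv D gl) ga.items (pvNsOf gt gm x)]
      cases hg : PySem.Dict.get? (PySem.Dict.mk ga.items) (pvNsOf gt gm x) with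
      | none =>
        have hg' : PySem.Dict.get? ga (pvNsOf gt gm x) = none := hg
        simp only [Option.map_none]
        have hgd : PySem.Dict.getD ga (pvNsOf gt gm x) [] = [] := by
          simp [PySem.Dict.getD, hg']
        rw [hgd]
        rw [← pvTrv_single D x]
        rw [pvInsert_mk_map (fun gl => pvTrv D gl) ga.items (pvNsOf gt gm x) [x]]
        simp
      | some gl =>
        have hg' : PySem.Dict.get? ga (pvNsOf gt gm x) = some gl := hg
        have hglne : gl ≠ [] := by
          rcases pvGet?_mem ga _ _ hg' with ⟨p, hp, _, hpv⟩
          exact hpv ▸ hne p hp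
        simp only [Option.map_some]
        have hgd : PySem.Dict.getD ga (pvNsOf gt gm x) [] = gl := by
          simp [PySem.Dict.getD, hg']
        rw [hgd]
        have hmapne : gl.map D ≠ [] := by simpa using hglne
        have hmax : pvMaxD (gl.map D ++ [D x]) = max (pvMaxD (gl.map D)) (D x) :=
          pvMaxD_append (gl.map D) (D x) hmapne
        have hmapapp : (gl ++ [x]).map D = gl.map D ++ [D x] := by simp
        rcases lt_trichotomy (pvMaxD (gl.map D)) (D x) with hlt | heq | hgt
        · rw [if_pos (show (pvTrv D gl).1 < D x from hlt)]
          have hval : ((D x : Int), ([x] : List Int)) = pvTrv D (gl ++ [x]) := by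
            unfold pvTrv
            rw [hmapapp, hmax, max_eq_right (le_of_lt hlt)]
            have hfl : gl.filter (fun i => decide (D i = D x)) = [] := by
              rw [List.filter_eq_nil_iff]
              intro i hi
              have hle : D i ≤ pvMaxD (gl.map D) := le_pvMaxD _ _ (List.mem_map_of_mem hi)
              simp only [decide_eq_true_eq]
              omega
            rw [List.filter_append, hfl]
            simp
          rw [hval]
          rw [pvInsert_mk_map (fun gl => pvTrv D gl) ga.items (pvNsOf gt gm x) (gl ++ [x])]
        · rw [if_neg (show ¬ (pvTrv D gl).1 < D x by exact not_lt.2 (le_of_eq heq.symm))]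
          rw [if_pos (show D x = (pvTrv D gl).1 from heq.symm)]
          have hval : (((pvTrv D gl).1 : Int), (pvTrv D gl).2 ++ [x]) = pvTrv D (gl ++ [x]) := by
            unfold pvTrv
            rw [hmapapp, hmax, max_eq_left (le_of_eq heq.symm)]
            have hfl : [x].filter (fun i => decide (D i = pvMaxD (gl.map D))) = [x] := by
              simp [heq]
            rw [List.filter_append, hfl]
          rw [hval]
          rw [pvInsert_mk_map (fun gl => pvTrv D gl) ga.items (pvNsOf gt gm x) (gl ++ [x])]
        · rw [if_neg (show ¬ (pvTrv D gl).1 < D x by exact not_lt.2 (le_of_lt hgt))]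
          rw [if_neg (show ¬ D x = (pvTrv D gl).1 from fun hc => by simp only [pvTrv] at hc; omega)]
          have hval : pvTrv D (gl ++ [x]) = pvTrv D gl := by
            unfold pvTrv
            rw [hmapapp, hmax, max_eq_left (le_of_lt hgt)]
            have hfl : [x].filter (fun i => decide (D i = pvMaxD (gl.map D))) = [] := by
              simp only [List.filter_cons, List.filter_nil, decide_eq_true_eq]
              rw [if_neg]
              intro hc
              omega
            rw [List.filter_append, hfl]
            simp
          rw [← pvInsert_mk_map (fun gl => pvTrv D gl) ga.items (pvNsOf gt gm x) (gl ++ [x])]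
          rw [hval]
          symm
          apply pvInsert_self
          · rw [pvKeys_mk_map]
            exact hnd
          · rw [pvGet?_mk_map (fun gl => pvTrv D gl) ga.items (pvNsOf gt gm x), hg']
            rfl
    rw [hstep]
    apply ih
    · exact PySem.Dict.nodup_keys_insert _ _ _ hnd
    · intro e he
      simp only [pvGStep] at he
      rcases pvItems_insert_sub ga (pvNsOf gt gm x) (PySem.Dict.getD ga (pvNsOf gt gm x) [] ++ [x]) e he with h | h
      · subst h; simp
      · exact hne e h

-- ----- membership through the two result-building folds -----
theorem pvMemAppendFold {γ : Type} (f : γ → List Int) :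
    ∀ (gls : List γ) (acc : List Int) (x : Int),
    (x ∈ gls.foldl (fun s gl => s ++ f gl) acc) ↔ x ∈ acc ∨ ∃ gl ∈ gls, x ∈ f gl := by
  intro gls
  induction gls with
  | nil => intro acc x; simp
  | cons g gls ih =>
    intro acc x
    simp only [List.foldl_cons]
    rw [ih, List.mem_append]
    constructor
    · rintro ((h | h) | ⟨gl, hgl, hx⟩)
      · exact Or.inl h
      · exact Or.inr ⟨g, by simp, h⟩
      · exact Or.inr ⟨gl, List.mem_cons_of_mem g hgl, hx⟩
    · rintro (h | ⟨gl, hgl, hx⟩)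
      · exact Or.inl (Or.inl h)
      · rcases List.mem_cons.1 hgl with h | h
        · exact Or.inl (Or.inr (h ▸ hx))
        · exact Or.inr ⟨gl, h, hx⟩

theorem pvMemUpdateFold {γ : Type} (f : γ → List Int) :
    ∀ (gls : List γ) (s : PySem.Set Int) (x : Int),
    (x ∈ gls.foldl (fun s gl => PySem.Set.update s (f gl)) s) ↔ x ∈ s ∨ ∃ gl ∈ gls, x ∈ f gl := by
  intro gls
  induction gls with
  | nil => intro s x; simp
  | cons g gls ih =>
    intro s x
    simp only [List.foldl_cons]
    rw [ih, PySem.Set.mem_update]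
    constructor
    · rintro ((h | h) | ⟨gl, hgl, hx⟩)
      · exact Or.inl h
      · exact Or.inr ⟨g, by simp, h⟩
      · exact Or.inr ⟨gl, List.mem_cons_of_mem g hgl, hx⟩
    · rintro (h | ⟨gl, hgl, hx⟩)
      · exact Or.inl (Or.inl h)
      · rcases List.mem_cons.1 hgl with h | h
        · exact Or.inl (Or.inr (h ▸ hx))
        · exact Or.inr ⟨gl, h, hx⟩


theorem pvSound_empty (pl : List (String × List String)) : pvSound pl (PySem.Dict.mk []) := by
  intro g d h
  simp [PySem.Dict.get?] at h

theorem pvValues_mk_map {A B : Type} (f : A → B) (l : List (String × A)) :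
    (PySem.Dict.mk (l.map (fun e => (e.1, f e.2)))).values = l.map (fun e => f e.2) := by
  simp [PySem.Dict.values, List.map_map]

theorem pvAStep_red (pl : List (String × List String)) (F : Nat) (gt : List String) (k : Int)
    (gl sel : List Int) (c : PySem.Dict String Int)
    (hc : pvSound pl c) (hall : ∀ i ∈ gl, pvStepIter pl F [pvTerm gt i] = []) :
    pvAStep pl F gt k (sel, c) gl
      = (sel ++ PySem.List.slice (gl.filter (fun i => decide (pvDepth pl F (pvTerm gt i) = pvMaxD (gl.map (fun j => pvDepth pl F (pvTerm gt j)))))) none (some k),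
         (pvDeepFold pl F gt (pvMaxD ((pvDepthsFold pl F gt gl c).1)) gl (pvDepthsFold pl F gt gl c).2).2)
    ∧ pvSound pl (pvDeepFold pl F gt (pvMaxD ((pvDepthsFold pl F gt gl c).1)) gl (pvDepthsFold pl F gt gl c).2).2 := by
  have h1 := pvFoldG pl F (fun i => pvTerm gt i) (fun l (_ : Int) d => l ++ [d]) gl [] c hc hall
  have e1 : (pvDepthsFold pl F gt gl c).1 = gl.map (fun j => pvDepth pl F (pvTerm gt j)) := by
    calc (pvDepthsFold pl F gt gl c).1
        = gl.foldl (fun l i => l ++ [pvDepth pl F (pvTerm gt i)]) [] := h1.1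
      _ = gl.map (fun j => pvDepth pl F (pvTerm gt j)) := by
          rw [pvFoldMap (fun j => pvDepth pl F (pvTerm gt j)) gl []]; simp
  have s1 : pvSound pl (pvDepthsFold pl F gt gl c).2 := h1.2
  have h2 := pvFoldG pl F (fun i => pvTerm gt i)
    (fun l (x : Int) d => if d = pvMaxD ((pvDepthsFold pl F gt gl c).1) then l ++ [x] else l)
    gl [] (pvDepthsFold pl F gt gl c).2 s1 hall
  have e2 : (pvDeepFold pl F gt (pvMaxD ((pvDepthsFold pl F gt gl c).1)) gl (pvDepthsFold pl F gt gl c).2).1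
      = gl.filter (fun i => decide (pvDepth pl F (pvTerm gt i) = pvMaxD ((pvDepthsFold pl F gt gl c).1))) := by
    calc (pvDeepFold pl F gt (pvMaxD ((pvDepthsFold pl F gt gl c).1)) gl (pvDepthsFold pl F gt gl c).2).1
        = gl.foldl (fun l i => if pvDepth pl F (pvTerm gt i) = pvMaxD ((pvDepthsFold pl F gt gl c).1) then l ++ [i] else l) [] := h2.1
      _ = _ := by
          rw [pvFoldFilter (fun j => pvDepth pl F (pvTerm gt j)) (pvMaxD ((pvDepthsFold pl F gt gl c).1)) gl []]; simp
  refine ⟨?_, h2.2⟩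
  show (sel ++ PySem.List.slice (pvDeepFold pl F gt (pvMaxD ((pvDepthsFold pl F gt gl c).1)) gl (pvDepthsFold pl F gt gl c).2).1 none (some k),
        (pvDeepFold pl F gt (pvMaxD ((pvDepthsFold pl F gt gl c).1)) gl (pvDepthsFold pl F gt gl c).2).2) = _
  rw [e2, e1]

theorem pvAFold_red (pl : List (String × List String)) (F : Nat) (gt : List String) (k : Int) :
    ∀ (gls : List (List Int)) (sel : List Int) (c : PySem.Dict String Int),
    pvSound pl c → (∀ gl ∈ gls, ∀ i ∈ gl, pvStepIter pl F [pvTerm gt i] = []) →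
    (gls.foldl (pvAStep pl F gt k) (sel, c)).1
      = gls.foldl (fun sel gl => sel ++ PySem.List.slice (gl.filter (fun i => decide (pvDepth pl F (pvTerm gt i) = pvMaxD (gl.map (fun j => pvDepth pl F (pvTerm gt j)))))) none (some k)) sel := by
  intro gls
  induction gls with
  | nil => intro sel c _ _; rfl
  | cons gl gls ih =>
    intro sel c hc hall
    simp only [List.foldl_cons]
    obtain ⟨estep, s2⟩ := pvAStep_red pl F gt k gl sel c hc (hall gl (by simp))
    rw [estep]
    exact ih _ _ s2 (fun g hg => hall g (List.mem_cons_of_mem gl hg))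

-- ===== VERDICT (by name: the statement is the Claim_ definition above) =====
theorem select_deepest_by_namespace_py_spec : Claim_equal_select_deepest_by_namespace_py := by
  intro indices gt gm pl k hDom hPre
  unfold Spec_select_deepest_by_namespace_py
  obtain ⟨hIdx, hAcyc⟩ := hPre
  have hstepOK : ∀ i ∈ indices, pvStepIter pl (pvFuel pl) [pvTerm gt i] = [] := by
    intro i hi
    apply pvStepIter_empty_of_mem pl (pvFuel pl) _ hAcyc
    rw [PySem.Set.mem_ofList]
    exact List.mem_map_of_mem hi
  by_cases hnil : indices = []
  · subst hnil
    simp [select_deepest_by_namespace_py, select_deepest_by_namespace_py_alt]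
  · simp only [select_deepest_by_namespace_py, select_deepest_by_namespace_py_alt, if_neg hnil]
    have hinv := pvGrpInv gt gm (fun j => j ∈ indices) indices (PySem.Dict.mk [])
      (by simp [PySem.Dict.keys]) (by simp) (fun x hx => hx)
    have hvals : ∀ gl ∈ (indices.foldl (pvGStep gt gm) (PySem.Dict.mk [])).values,
        ∀ i ∈ gl, pvStepIter pl (pvFuel pl) [pvTerm gt i] = [] := by
      intro gl hgl i hi
      simp only [PySem.Dict.values] at hgl
      rcases List.mem_map.1 hgl with ⟨e, he, rfl⟩
      exact hstepOK i ((hinv.2 e he).2 i hi)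
    have hAred := pvAFold_red pl (pvFuel pl) gt k
      ((indices.foldl (pvGStep gt gm) (PySem.Dict.mk [])).values) [] (PySem.Dict.mk [])
      (pvSound_empty pl) hvals
    have hB := pvFoldG pl (pvFuel pl) (fun i => pvTerm gt i)
      (fun bd (x : Int) d => pvBestUpd bd (pvNsOf gt gm x) x d)
      indices (PySem.Dict.mk []) (PySem.Dict.mk []) (pvSound_empty pl) hstepOK
    have eB : (indices.foldl (pvBStep pl (pvFuel pl) gt gm) (PySem.Dict.mk [], PySem.Dict.mk [])).1
        = PySem.Dict.mk ((indices.foldl (pvGStep gt gm) (PySem.Dict.mk [])).items.map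
            (fun e => (e.1, pvTrv (fun j => pvDepth pl (pvFuel pl) (pvTerm gt j)) e.2))) := by
      have h1 : (indices.foldl (pvBStep pl (pvFuel pl) gt gm) (PySem.Dict.mk [], PySem.Dict.mk [])).1
          = indices.foldl (fun bd i => pvBestUpd bd (pvNsOf gt gm i) i (pvDepth pl (pvFuel pl) (pvTerm gt i))) (PySem.Dict.mk []) := hB.1
      rw [h1]
      have hrel := pvGroupRel gt gm (fun j => pvDepth pl (pvFuel pl) (pvTerm gt j)) indices (PySem.Dict.mk [])
        (by simp [PySem.Dict.keys]) (by simp)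
      simpa using hrel
    apply List.filter_congr
    intro i hi
    rw [Bool.eq_iff_iff, PySem.Set.contains_iff, PySem.Set.contains_iff, PySem.Set.mem_ofList]
    rw [hAred, eB]
    rw [pvMemAppendFold (fun (gl : List Int) => PySem.List.slice (List.filter (fun i => decide (pvDepth pl (pvFuel pl) (pvTerm gt i) = pvMaxD (List.map (fun j => pvDepth pl (pvFuel pl) (pvTerm gt j)) gl))) gl) none (some k))]
    rw [pvValues_mk_map (fun gl => pvTrv (fun j => pvDepth pl (pvFuel pl) (pvTerm gt j)) gl)
      ((indices.foldl (pvGStep gt gm) (PySem.Dict.mk [])).items)]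
    rw [pvMemUpdateFold (fun (e : Int × List Int) => PySem.List.slice e.2 none (some k))]
    simp only [List.not_mem_nil, false_or, PySem.Set.empty, List.mem_map, PySem.Dict.values]
    constructor
    · rintro ⟨gl, ⟨e, he, rfl⟩, hx⟩
      exact ⟨pvTrv (fun j => pvDepth pl (pvFuel pl) (pvTerm gt j)) e.2, ⟨e, he, rfl⟩, by simpa [pvTrv] using hx⟩
    · rintro ⟨y, ⟨e, he, rfl⟩, hx⟩
      exact ⟨e.2, ⟨e, he, rfl⟩, by simpa [pvTrv] using hx⟩
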